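-- pv_equiv track=rewrite | github.com/Pusooy/JPEG-Compressor | utils.py | get_ones_complement_bit_string
-- ===== SOURCE A (Python) =====
-- def get_ones_complement_bit_string(value):
--     """Returns the ones complement bit string of a value."""
--     if value == 0:
--         return ''
--     negative = False
--     if value < 0:
--         negative = True
--         value *= -1
--     bit_string = bin(value)[2:]  # Chop off the '0b' bin returns
--     if negative:
--         bit_list = list(bit_string)
--         for index, bit in enumerate(bit_list):
--             if bit == '0':
--                 bit_list[index] = '1'
--             else:
--                 bit_list[index] = '0'
--         bit_string = ''.join(bit_list)
--     return bit_string
-- ===== SOURCE B (Python) =====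
-- def get_ones_complement_bit_string(value):
--     """Returns the ones complement bit string of a value."""
--     if value == 0:
--         return ''
--     if value > 0:
--         return bin(value)[2:]
--     length = value.bit_length()
--     comp = (1 << length) - 1 + value
--     return bin(comp)[2:].zfill(length)
-- ===== Notes on version B (the rewrite author's own statement) =====
-- stated objective: idiomatic
-- what changed: The per-character flipping loop over the binary string is replaced by arithmetic: complement against an all-ones mask of the value's bit length, then zero-padded binary formatting.
import Mathlib
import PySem

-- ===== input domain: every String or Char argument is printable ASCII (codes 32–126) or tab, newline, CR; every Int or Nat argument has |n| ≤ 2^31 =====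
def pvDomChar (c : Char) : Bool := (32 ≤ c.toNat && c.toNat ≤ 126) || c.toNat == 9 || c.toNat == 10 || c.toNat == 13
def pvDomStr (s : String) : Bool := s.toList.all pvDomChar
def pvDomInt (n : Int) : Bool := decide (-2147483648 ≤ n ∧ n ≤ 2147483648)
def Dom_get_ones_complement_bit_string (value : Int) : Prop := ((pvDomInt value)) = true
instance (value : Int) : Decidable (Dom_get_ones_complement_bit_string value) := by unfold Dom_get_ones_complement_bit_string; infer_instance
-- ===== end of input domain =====

-- B replaces A's per-character flipping loop by an arithmetic complement against an
-- all-ones mask of the value's bit length plus zero-padded binary formatting (idiomatic, same cost).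

-- ===== PORT A =====
-- Python's `for index, bit in enumerate(bit_list): bit_list[index] = …` only ever
-- overwrites the position being visited, so folding the enumeration of the original
-- list over it with List.set is exact.
def get_ones_complement_bit_string (value : Int) : String :=
  if value = 0 then "" else
  let negative : Bool := decide (value < 0)
  let value : Int := if value < 0 then value * (-1) else value
  -- bin(value)[2:]  — chop off the '0b'
  let bit_string : List Char := PySem.List.slice (PySem.Int.toBinChars0b value) (some 2) none
  let bit_string : List Char :=
    if negative then
      (PySem.List.enumerate bit_string 0).foldl
        (fun bit_list p =>
          if p.2 = '0' then bit_list.set p.1.toNat '1' else bit_list.set p.1.toNat '0')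
        bit_string
    else bit_string
  String.ofList bit_string  -- ''.join(bit_list) of one-char strings

-- ===== PORT B =====
def get_ones_complement_bit_string_alt (value : Int) : String :=
  if value = 0 then ""
  else if value > 0 then
    String.ofList (PySem.List.slice (PySem.Int.toBinChars0b value) (some 2) none)  -- bin(value)[2:]
  else
    let length : Nat := PySem.Int.bitLength value
    let comp : Int := ((1 : Int) <<< length) - 1 + value
    -- bin(comp)[2:].zfill(length)
    String.ofList (PySem.Chars.zfill (PySem.List.slice (PySem.Int.toBinChars0b comp) (some 2) none)
      (length : Int))

-- ===== PRECONDITION & SPEC =====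
def Spec_get_ones_complement_bit_string (value : Int) (out : String) : Prop := out = get_ones_complement_bit_string_alt value
instance (value : Int) (out : String) : Decidable (Spec_get_ones_complement_bit_string value out) := by unfold Spec_get_ones_complement_bit_string; infer_instance

-- ===== CLAIM (what is proved, stated in full; the proofs are below) =====
def Claim_equal_get_ones_complement_bit_string : Prop := ∀ (value : Int), Dom_get_ones_complement_bit_string value → Spec_get_ones_complement_bit_string value (get_ones_complement_bit_string value)

-- ===== LEMMAS AND PROOFS =====

def pvFlip (c : Char) : Char := if c = '0' then '1' else '0'

/-- The binary digit string of `n` (big-endian), as `Nat.toDigits 2` produces it. -/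
def pvBits (n : Nat) : List Char :=
  if n < 2 then [Nat.digitChar n]
  else pvBits (n / 2) ++ [Nat.digitChar (n % 2)]
decreasing_by exact Nat.div_lt_self (by omega) (by omega)

theorem pvBits_lt2 (n : Nat) (h : n < 2) : pvBits n = [Nat.digitChar n] := by
  rw [pvBits]; simp [h]

theorem pvBits_ge2 (n : Nat) (h : ¬ n < 2) :
    pvBits n = pvBits (n / 2) ++ [Nat.digitChar (n % 2)] := by
  rw [pvBits]; simp [h]

theorem pvBits_ne_nil (n : Nat) : pvBits n ≠ [] := by
  rw [pvBits]; split <;> simp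

set_option maxRecDepth 4096 in
theorem pvBits_mem01 (n : Nat) : ∀ c ∈ pvBits n, c = '0' ∨ c = '1' := by
  induction n using pvBits.induct with
  | case1 n h =>
    rw [pvBits_lt2 n h]
    interval_cases n <;> simp [Nat.digitChar]
  | case2 n h ih =>
    rw [pvBits_ge2 n h]
    intro c hc
    rcases List.mem_append.mp hc with hc | hc
    · exact ih c hc
    · simp only [List.mem_singleton] at hc
      subst hc
      rcases Nat.mod_two_eq_zero_or_one n with hm | hm <;> rw [hm] <;> decide

theorem toDigitsCore_eq : ∀ (f n : Nat) (ds : List Char), n < f →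
    Nat.toDigitsCore 2 f n ds = pvBits n ++ ds := by
  intro f
  induction f with
  | zero => intro n ds h; omega
  | succ f ih =>
    intro n ds h
    by_cases h2 : n < 2
    · have hd : n / 2 = 0 := by omega
      have hm : n % 2 = n := Nat.mod_eq_of_lt h2
      simp only [Nat.toDigitsCore, hd, hm, if_pos]
      rw [pvBits_lt2 n h2]
      rfl
    · have hd : ¬ n / 2 = 0 := by omega
      have hlt : n / 2 < f := by
        have := Nat.div_lt_self (n := n) (by omega) (by omega : 1 < 2)
        omega
      simp only [Nat.toDigitsCore, hd, if_false]
      rw [ih _ _ hlt, pvBits_ge2 n h2]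
      simp

theorem toDigits_eq (n : Nat) : Nat.toDigits 2 n = pvBits n := by
  have := toDigitsCore_eq (n + 1) n [] (by omega)
  simpa [Nat.toDigits] using this

set_option maxRecDepth 4096 in
theorem pvBits_length (n : Nat) (h : 0 < n) :
    (pvBits n).length = PySem.Int.bitLength (n : Int) := by
  induction n using pvBits.induct with
  | case1 n h2 =>
    have h1 : n = 1 := by omega
    subst h1
    rw [pvBits_lt2 1 (by omega)]
    decide
  | case2 n h2 ih =>
    have hq : 0 < n / 2 := by omega
    rw [pvBits_ge2 n h2, List.length_append, ih hq]
    rw [PySem.Int.bitLength_natCast (by omega : 0 < n)]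
    simp

theorem pvBits_lt (n : Nat) (h : 0 < n) : n < 2 ^ (pvBits n).length := by
  rw [pvBits_length n h]
  have := PySem.Int.lt_two_pow_bitLength (n : Int)
  simpa using this

set_option maxRecDepth 4096 in
theorem pvFlip_digitChar (r : Nat) (h : r < 2) :
    pvFlip (Nat.digitChar r) = Nat.digitChar (1 - r) := by
  interval_cases r <;> decide

set_option maxRecDepth 4096 in
theorem pvBits_flip (n : Nat) (h : 0 < n) :
    (pvBits n).map pvFlip =
      List.replicate ((pvBits n).length - (pvBits (2 ^ (pvBits n).length - 1 - n)).length) '0'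
        ++ pvBits (2 ^ (pvBits n).length - 1 - n) := by
  induction n using pvBits.induct with
  | case1 n h2 =>
    have h1 : n = 1 := by omega
    subst h1
    have e1 : pvBits 1 = ['1'] := pvBits_lt2 1 (by omega)
    have h21 : 2 ^ (['1'] : List Char).length - 1 - 1 = 0 := by simp
    rw [e1, h21, pvBits_lt2 0 (by omega)]
    decide
  | case2 n h2 ih =>
    have hq : 0 < n / 2 := by omega
    have hr : n % 2 < 2 := Nat.mod_lt _ (by omega)
    have hqlt : n / 2 < 2 ^ (pvBits (n / 2)).length := pvBits_lt _ hq
    have hbits : pvBits n = pvBits (n / 2) ++ [Nat.digitChar (n % 2)] := pvBits_ge2 n h2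
    have hlen : (pvBits n).length = (pvBits (n / 2)).length + 1 := by
      rw [hbits]; simp
    have hcomp : 2 ^ (pvBits n).length - 1 - n
        = 2 * (2 ^ (pvBits (n / 2)).length - 1 - n / 2) + (1 - n % 2) := by
      rw [hlen]
      have hp : 2 ^ ((pvBits (n / 2)).length + 1) = 2 * 2 ^ (pvBits (n / 2)).length := by ring
      omega
    have hmap : List.map pvFlip [Nat.digitChar (n % 2)] = [Nat.digitChar (1 - n % 2)] := by
      simp [pvFlip_digitChar _ hr]
    rw [hcomp, hlen, hbits, List.map_append, ih hq, hmap]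
    by_cases hc0 : 2 ^ (pvBits (n / 2)).length - 1 - n / 2 = 0
    · rw [hc0]
      have h1r : 2 * 0 + (1 - n % 2) = 1 - n % 2 := by omega
      rw [h1r, pvBits_lt2 0 (by omega), pvBits_lt2 (1 - n % 2) (by omega)]
      have hL1 : 1 ≤ (pvBits (n / 2)).length :=
        List.length_pos_iff.mpr (pvBits_ne_nil _)
      have hrep : List.replicate ((pvBits (n / 2)).length - 1) '0' ++ [Nat.digitChar 0]
          = List.replicate (pvBits (n / 2)).length '0' := by
        have h' : (pvBits (n / 2)).length - 1 + 1 = (pvBits (n / 2)).length := by omega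
        have hd0 : Nat.digitChar 0 = '0' := by decide
        rw [hd0, ← List.replicate_succ', h']
      simp only [List.length_singleton]
      rw [hrep]
      simp
    · have hcc : ¬ (2 * (2 ^ (pvBits (n / 2)).length - 1 - n / 2) + (1 - n % 2) < 2) := by
        omega
      have hbc : pvBits (2 * (2 ^ (pvBits (n / 2)).length - 1 - n / 2) + (1 - n % 2))
          = pvBits (2 ^ (pvBits (n / 2)).length - 1 - n / 2) ++ [Nat.digitChar (1 - n % 2)] := by
        rw [pvBits_ge2 _ hcc]
        have hdiv : (2 * (2 ^ (pvBits (n / 2)).length - 1 - n / 2) + (1 - n % 2)) / 2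
            = 2 ^ (pvBits (n / 2)).length - 1 - n / 2 := by omega
        have hmod : (2 * (2 ^ (pvBits (n / 2)).length - 1 - n / 2) + (1 - n % 2)) % 2
            = 1 - n % 2 := by omega
        rw [hdiv, hmod]
      rw [hbc]
      have harith : (pvBits (n / 2)).length + 1
            - ((pvBits (2 ^ (pvBits (n / 2)).length - 1 - n / 2)).length + 1)
          = (pvBits (n / 2)).length
            - (pvBits (2 ^ (pvBits (n / 2)).length - 1 - n / 2)).length := by omega
      simp only [List.length_append, List.length_singleton, harith, List.append_assoc]

theorem pvFold_set (l : List Char) : ∀ (acc : List Char) (s : Nat), acc.length = s + l.length →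
    (PySem.List.enumerate l (s : Int)).foldl
      (fun bit_list p =>
        if p.2 = '0' then bit_list.set p.1.toNat '1' else bit_list.set p.1.toNat '0')
      acc
    = acc.take s ++ l.map pvFlip := by
  induction l with
  | nil =>
    intro acc s hlen
    simp only [List.length_nil, Nat.add_zero] at hlen
    simp [PySem.List.enumerate_nil, List.take_of_length_le (le_of_eq hlen)]
  | cons c t ih =>
    intro acc s hlen
    simp only [List.length_cons] at hlen
    rw [PySem.List.enumerate_cons]
    simp only [List.foldl_cons]
    have hstep :
        (if c = '0' then acc.set ((s : Int)).toNat '1' else acc.set ((s : Int)).toNat '0')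
          = acc.set s (pvFlip c) := by
      simp only [Int.toNat_natCast, pvFlip]
      by_cases hc : c = '0' <;> simp [hc]
    rw [hstep]
    have hcast : ((s : Int) + 1) = ((s + 1 : Nat) : Int) := by push_cast; ring
    rw [hcast]
    have hlen' : (acc.set s (pvFlip c)).length = (s + 1) + t.length := by
      simp [List.length_set]
      omega
    rw [ih _ (s + 1) hlen']
    have hs : s < acc.length := by omega
    have hset : acc.set s (pvFlip c) = acc.take s ++ pvFlip c :: acc.drop (s + 1) := by
      rw [List.set_eq_take_append_cons_drop]; simp [hs]
    rw [hset]
    have htk : (acc.take s ++ pvFlip c :: acc.drop (s + 1)).take (s + 1)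
        = acc.take s ++ [pvFlip c] := by
      rw [List.take_append]
      have hlt : (acc.take s).length = s := by simp; omega
      rw [hlt]
      have h1 : s + 1 - s = 1 := by omega
      rw [h1]
      simp [List.take_take]
    rw [htk]
    simp

theorem pvZfill_digits (cs : List Char) (hne : cs ≠ [])
    (hd : ∀ c ∈ cs, c = '0' ∨ c = '1') (w : Nat) :
    PySem.Chars.zfill cs (w : Int) = List.replicate (w - cs.length) '0' ++ cs := by
  unfold PySem.Chars.zfill
  cases cs with
  | nil => exact absurd rfl hne
  | cons c rest =>
    by_cases hle : (w : Int) ≤ ((c :: rest).length : Int)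
    · have hw : w - (c :: rest).length = 0 := by
        have : w ≤ (c :: rest).length := by exact_mod_cast hle
        omega
      rw [if_pos hle, hw]
      rfl
    · have hc : ¬ (c = '+' ∨ c = '-') := by
        rcases hd c (List.mem_cons_self) with h | h <;> subst h <;> decide
      rw [if_neg hle]
      simp [hc]

-- A's binary string (as chars) for a non-negative value is `pvBits`.
theorem pvSlice_bin (v : Int) (hv : 0 ≤ v) :
    PySem.List.slice (PySem.Int.toBinChars0b v) (some 2) none = pvBits v.toNat := by
  rw [PySem.List.slice_from _ (by omega : (0:Int) ≤ 2)]
  unfold PySem.Int.toBinChars0b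
  rw [if_neg (by omega : ¬ v < 0), show Int.toNat 2 = 2 from rfl]
  simp [toDigits_eq]

-- ===== VERDICT (by name: the statement is the Claim_ definition above) =====
theorem get_ones_complement_bit_string_spec : Claim_equal_get_ones_complement_bit_string := by
  unfold Claim_equal_get_ones_complement_bit_string
  intro value _
  unfold Spec_get_ones_complement_bit_string
  unfold get_ones_complement_bit_string get_ones_complement_bit_string_alt
  by_cases h0 : value = 0
  · simp [h0]
  · rw [if_neg h0, if_neg h0]
    by_cases hneg : value < 0
    · -- negative case
      have hpos : ¬ value > 0 := by omega
      obtain ⟨m, hvm, hm1⟩ : ∃ m : Nat, value = -(m : Int) ∧ 0 < m :=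
        ⟨(-value).toNat, by omega, by omega⟩
      simp only [hneg, decide_true, if_true, if_neg hpos]
      have hvm' : value * (-1) = (m : Int) := by omega
      rw [hvm', pvSlice_bin (m : Int) (by omega)]
      simp only [Int.toNat_natCast]
      -- left side: the flipping fold is `map pvFlip`
      have hfold := pvFold_set (pvBits m) (pvBits m) 0 (by simp)
      simp only [Nat.cast_zero] at hfold
      rw [hfold, List.take_zero, List.nil_append]
      -- right side
      have hbl : PySem.Int.bitLength value = (pvBits m).length := by
        rw [hvm, PySem.Int.bitLength_neg, ← pvBits_length m hm1]
      have hmlt : m < 2 ^ (pvBits m).length := pvBits_lt m hm1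
      have hshift : ((1 : Int) <<< (pvBits m).length) = (2 : Int) ^ (pvBits m).length := by
        rw [Int.shiftLeft_eq]; ring
      have h2L : ((2 ^ (pvBits m).length : Nat) : Int) = (2 : Int) ^ (pvBits m).length := by
        push_cast; ring
      have hcomp : ((1 : Int) <<< PySem.Int.bitLength value) - 1 + value
          = ((2 ^ (pvBits m).length - 1 - m : Nat) : Int) := by
        rw [hbl, hshift, ← h2L]
        omega
      rw [hcomp, pvSlice_bin _ (by exact_mod_cast Int.natCast_nonneg _), Int.toNat_natCast]
      rw [pvZfill_digits _ (pvBits_ne_nil _) (pvBits_mem01 _), hbl]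
      exact congrArg String.ofList (pvBits_flip m hm1)
    · -- positive case
      have hpos : value > 0 := by omega
      simp [hneg, hpos]
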